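-- pv_equiv track=rewrite | github.com/issdandavis/SCBE-AETHERMOORE | scripts/system/system_card_deck.py | build_workflow_cards
-- ===== SOURCE A (Python) =====
-- from typing import Any
--
-- def build_workflow_cards(workflows: list[dict[str, Any]]) -> list[dict[str, Any]]:
--     cards = []
--     for workflow in workflows:
--         triage = workflow.get("triage", "yellow")
--         cards.append(
--             {
--                 "name": workflow["name"],
--                 "category": workflow.get("category", "ci"),
--                 "triage": triage,
--                 "color": {"green": "green", "yellow": "amber", "red": "red"}.get(triage, "gray"),
--                 "branch": workflow.get("branch", ""),
--                 "conclusion": workflow.get("conclusion", ""),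
--                 "fix": workflow.get("fix"),
--             }
--         )
--     return sorted(cards, key=lambda item: {"red": 0, "yellow": 1, "green": 2}.get(item["triage"], 3))
-- ===== SOURCE B (Python) =====
-- def _pr(t):
--     return 0 if t == "red" else 1 if t == "yellow" else 2 if t == "green" else 3
--
--
-- def _card(w):
--     t = w.get("triage", "yellow")
--     if t == "green":
--         color = "green"
--     elif t == "yellow":
--         color = "amber"
--     elif t == "red":
--         color = "red"
--     else:
--         color = "gray"
--     return {
--         "name": w["name"],
--         "category": w.get("category", "ci"),
--         "triage": t,
--         "color": color,
--         "branch": w.get("branch", ""),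
--         "conclusion": w.get("conclusion", ""),
--         "fix": w.get("fix"),
--     }
--
--
-- def build_workflow_cards(workflows):
--     cards = [_card(w) for w in workflows]
--     return (
--         [c for c in cards if _pr(c["triage"]) == 0]
--         + [c for c in cards if _pr(c["triage"]) == 1]
--         + [c for c in cards if _pr(c["triage"]) == 2]
--         + [c for c in cards if _pr(c["triage"]) == 3]
--     )
-- ===== Notes on version B (the rewrite author's own statement) =====
-- stated objective: alternative
-- what changed: Replaced the final comparison sort (sorted with a priority key) by a linear bucket pass: cards are built once, then concatenated as the red, yellow, green and other sublists, relying on order-preserving filtering to reproduce the stable sort on tied keys; the color table lookup became an if/elif chain.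
import Mathlib
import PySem

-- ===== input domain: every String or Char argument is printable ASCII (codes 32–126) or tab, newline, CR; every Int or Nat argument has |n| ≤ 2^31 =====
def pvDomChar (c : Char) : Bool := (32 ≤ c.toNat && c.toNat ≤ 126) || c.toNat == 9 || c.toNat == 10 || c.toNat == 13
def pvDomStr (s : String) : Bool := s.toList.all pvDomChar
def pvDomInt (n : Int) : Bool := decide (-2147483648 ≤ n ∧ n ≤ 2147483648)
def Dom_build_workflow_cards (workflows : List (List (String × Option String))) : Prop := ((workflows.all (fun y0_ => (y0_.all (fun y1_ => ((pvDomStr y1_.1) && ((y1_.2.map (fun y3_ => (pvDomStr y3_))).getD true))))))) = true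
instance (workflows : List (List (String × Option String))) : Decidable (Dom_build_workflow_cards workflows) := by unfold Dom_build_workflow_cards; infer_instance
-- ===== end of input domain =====

-- B replaces A's final stable sort by a linear four-bucket (filter) pass; same cards, same order.
-- Pre_ excludes workflows missing the "name" key, on which the Python A raises KeyError.


-- ===== PORT A =====
-- dict.get(k, d) on an association-list dict (first match, insertion order)
def wfGetD (w : List (String × Option String)) (k : String) (d : Option String) : Option String :=
  PySem.Dict.getD ⟨w⟩ k d

-- the card dict A appends for one workflow; w["name"] is total under Pre_ (the
-- key is present), so the `.getD none` branch of the lookup is unreachable there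
def cardA (w : List (String × Option String)) : List (String × Option String) :=
  let triage := wfGetD w "triage" (some "yellow")
  [("name", (PySem.Dict.get? (⟨w⟩ : PySem.Dict String (Option String)) "name").getD none),
   ("category", wfGetD w "category" (some "ci")),
   ("triage", triage),
   ("color", some (PySem.Dict.getD (⟨[(some "green", "green"), (some "yellow", "amber"), (some "red", "red")]⟩ : PySem.Dict (Option String) String) triage "gray")),
   ("branch", wfGetD w "branch" (some "")),
   ("conclusion", wfGetD w "conclusion" (some "")),
   ("fix", wfGetD w "fix" none)]

-- the sort key: {"red": 0, "yellow": 1, "green": 2}.get(item["triage"], 3)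
-- (item["triage"] always exists on A's cards; ported as lookup with default none)
def keyA (item : List (String × Option String)) : Int :=
  PySem.Dict.getD (⟨[(some "red", (0 : Int)), (some "yellow", 1), (some "green", 2)]⟩ : PySem.Dict (Option String) Int)
    (wfGetD item "triage" none) 3

def build_workflow_cards (workflows : List (List (String × Option String))) : List (List (String × Option String)) :=
  let cards := workflows.foldl (fun acc w => acc ++ [cardA w]) []
  PySem.List.sorted cards keyA false

-- ===== PORT B =====
def prB (t : Option String) : Int :=
  if t == some "red" then 0 else if t == some "yellow" then 1 else if t == some "green" then 2 else 3

def cardB (w : List (String × Option String)) : List (String × Option String) :=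
  let t := wfGetD w "triage" (some "yellow")
  let color := if t == some "green" then "green" else if t == some "yellow" then "amber"
               else if t == some "red" then "red" else "gray"
  [("name", (PySem.Dict.get? (⟨w⟩ : PySem.Dict String (Option String)) "name").getD none),
   ("category", wfGetD w "category" (some "ci")),
   ("triage", t),
   ("color", some color),
   ("branch", wfGetD w "branch" (some "")),
   ("conclusion", wfGetD w "conclusion" (some "")),
   ("fix", wfGetD w "fix" none)]

def build_workflow_cards_alt (workflows : List (List (String × Option String))) : List (List (String × Option String)) :=
  let cards := workflows.map cardB
  let pr := fun c => prB (wfGetD c "triage" none)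
  cards.filter (fun c => pr c == 0) ++ cards.filter (fun c => pr c == 1)
    ++ cards.filter (fun c => pr c == 2) ++ cards.filter (fun c => pr c == 3)

-- ===== PRECONDITION & SPEC =====
-- Pre_ excludes exactly the workflows without a "name" key, on which A raises KeyError.
def Pre_build_workflow_cards (workflows : List (List (String × Option String))) : Prop :=
  workflows.all (fun w => w.any (fun p => p.1 == "name")) = true
instance (workflows : List (List (String × Option String))) : Decidable (Pre_build_workflow_cards workflows) := by unfold Pre_build_workflow_cards; infer_instance

def pvWitness_build_workflow_cards : (List (List (String × Option String))) :=
  [[("name", some "lint"), ("triage", some "red")], [("name", some "build")]]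

def Spec_build_workflow_cards (workflows : List (List (String × Option String))) (out : List (List (String × Option String))) : Prop := out = build_workflow_cards_alt workflows
instance (workflows : List (List (String × Option String))) (out : List (List (String × Option String))) : Decidable (Spec_build_workflow_cards workflows out) := by unfold Spec_build_workflow_cards; infer_instance

-- ===== CLAIM (what is proved, stated in full; the proofs are below) =====
def Claim_equal_build_workflow_cards : Prop := ∀ (workflows : List (List (String × Option String))), Dom_build_workflow_cards workflows → Pre_build_workflow_cards workflows → Spec_build_workflow_cards workflows (build_workflow_cards workflows)

-- ===== LEMMAS AND PROOFS =====

theorem cardA_eq_cardB (w : List (String × Option String)) : cardA w = cardB w := by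
  unfold cardA cardB
  cases h : wfGetD w "triage" (some "yellow") with
  | none => simp [PySem.Dict.getD, PySem.Dict.get?, List.find?]
  | some s =>
      simp only [PySem.Dict.getD, PySem.Dict.get?, List.find?]
      by_cases h1 : s = "green"
      · simp [h1]
      · by_cases h2 : s = "yellow"
        · simp [h2]
        · by_cases h3 : s = "red"
          · simp [h3]
          · simp [beq_eq_false_iff_ne.mpr (Ne.symm h1), beq_eq_false_iff_ne.mpr (Ne.symm h2),
              beq_eq_false_iff_ne.mpr (Ne.symm h3), beq_eq_false_iff_ne.mpr h1,
              beq_eq_false_iff_ne.mpr h2, beq_eq_false_iff_ne.mpr h3]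

theorem keyA_eq_prB (c : List (String × Option String)) : keyA c = prB (wfGetD c "triage" none) := by
  unfold keyA prB
  cases h : wfGetD c "triage" none with
  | none => simp [PySem.Dict.getD, PySem.Dict.get?, List.find?]
  | some s =>
      simp only [PySem.Dict.getD, PySem.Dict.get?, List.find?]
      by_cases h1 : s = "red"
      · simp [h1]
      · by_cases h2 : s = "yellow"
        · simp [h2]
        · by_cases h3 : s = "green"
          · simp [h3]
          · simp [beq_eq_false_iff_ne.mpr (Ne.symm h1), beq_eq_false_iff_ne.mpr (Ne.symm h2),
              beq_eq_false_iff_ne.mpr (Ne.symm h3), beq_eq_false_iff_ne.mpr h1,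
              beq_eq_false_iff_ne.mpr h2, beq_eq_false_iff_ne.mpr h3]

-- the four-bucket decomposition of a list under an Int-valued key with range {0,1,2,3}
def buckets {α : Type} (key : α → Int) (l : List α) : List α :=
  l.filter (fun c => key c == 0) ++ l.filter (fun c => key c == 1)
    ++ l.filter (fun c => key c == 2) ++ l.filter (fun c => key c == 3)

theorem insertBy_pre_suf {α : Type} (before : α → α → Bool) (x : α) :
    ∀ (pre suf : List α), (∀ y ∈ pre, before x y = false) →
      (∀ y ∈ suf, before x y = true) →
      PySem.List.insertBy before x (pre ++ suf) = pre ++ x :: suf := by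
  intro pre
  induction pre with
  | nil =>
      intro suf _ hsuf
      cases suf with
      | nil => rfl
      | cons z zs => simp [PySem.List.insertBy, hsuf z (by simp)]
  | cons y ys ih =>
      intro suf hpre hsuf
      have hy : before x y = false := hpre y (by simp)
      simp only [List.cons_append, PySem.List.insertBy, hy]
      simp only [Bool.false_eq_true, if_false]
      rw [ih suf (fun z hz => hpre z (by simp [hz])) hsuf]

theorem insertBy_buckets {α : Type} (key : α → Int)
    (hk : ∀ a : α, key a = 0 ∨ key a = 1 ∨ key a = 2 ∨ key a = 3)
    (l : List α) (x : α) :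
    PySem.List.insertBy (fun a b => decide (key a < key b)) x (buckets key l)
      = buckets key (l ++ [x]) := by
  unfold buckets
  have hmem : ∀ (k : Int) (y : α), y ∈ l.filter (fun c => key c == k) → key y = k := by
    intro k y hy
    have := List.of_mem_filter hy
    simpa using this
  simp only [List.filter_append]
  rcases hk x with hx | hx | hx | hx <;> simp only [List.filter_cons, List.filter_nil, hx]
  · have := insertBy_pre_suf (fun a b => decide (key a < key b)) x
      (l.filter (fun c => key c == 0))
      (l.filter (fun c => key c == 1) ++ l.filter (fun c => key c == 2) ++ l.filter (fun c => key c == 3))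
      (by intro y hy; have := hmem 0 y hy; simp [this, hx])
      (by intro y hy
          simp only [List.append_assoc, List.mem_append] at hy
          rcases hy with hy | hy | hy
          · have := hmem 1 y hy; simp [this, hx]
          · have := hmem 2 y hy; simp [this, hx]
          · have := hmem 3 y hy; simp [this, hx])
    simp only [List.append_assoc] at this ⊢
    rw [this]; simp
  · have := insertBy_pre_suf (fun a b => decide (key a < key b)) x
      (l.filter (fun c => key c == 0) ++ l.filter (fun c => key c == 1))
      (l.filter (fun c => key c == 2) ++ l.filter (fun c => key c == 3))
      (by intro y hy
          simp only [List.mem_append] at hy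
          rcases hy with hy | hy
          · have := hmem 0 y hy; simp [this, hx]
          · have := hmem 1 y hy; simp [this, hx])
      (by intro y hy
          simp only [List.mem_append] at hy
          rcases hy with hy | hy
          · have := hmem 2 y hy; simp [this, hx]
          · have := hmem 3 y hy; simp [this, hx])
    simp only [List.append_assoc] at this ⊢
    rw [this]; simp
  · have := insertBy_pre_suf (fun a b => decide (key a < key b)) x
      (l.filter (fun c => key c == 0) ++ l.filter (fun c => key c == 1) ++ l.filter (fun c => key c == 2))
      (l.filter (fun c => key c == 3))
      (by intro y hy
          simp only [List.mem_append] at hy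
          rcases hy with (hy | hy) | hy
          · have := hmem 0 y hy; simp [this, hx]
          · have := hmem 1 y hy; simp [this, hx]
          · have := hmem 2 y hy; simp [this, hx])
      (by intro y hy; have := hmem 3 y hy; simp [this, hx])
    simp only [List.append_assoc] at this ⊢
    rw [this]; simp
  · have := insertBy_pre_suf (fun a b => decide (key a < key b)) x
      (l.filter (fun c => key c == 0) ++ l.filter (fun c => key c == 1) ++ l.filter (fun c => key c == 2) ++ l.filter (fun c => key c == 3))
      []
      (by intro y hy
          simp only [List.mem_append] at hy
          rcases hy with ((hy | hy) | hy) | hy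
          · have := hmem 0 y hy; simp [this, hx]
          · have := hmem 1 y hy; simp [this, hx]
          · have := hmem 2 y hy; simp [this, hx]
          · have := hmem 3 y hy; simp [this, hx])
      (by intro y hy; simp at hy)
    simp only [List.append_assoc, List.append_nil] at this ⊢
    rw [this]; simp

theorem sorted_eq_buckets {α : Type} (key : α → Int)
    (hk : ∀ a : α, key a = 0 ∨ key a = 1 ∨ key a = 2 ∨ key a = 3)
    (l : List α) : PySem.List.sorted l key false = buckets key l := by
  rw [PySem.List.sorted_eq_foldl_insertBy]
  induction l using List.reverseRecOn with
  | nil => rfl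
  | append_singleton l x ih =>
      rw [List.foldl_append, List.foldl_cons, List.foldl_nil, ih, insertBy_buckets key hk]

theorem prB_range (t : Option String) : prB t = 0 ∨ prB t = 1 ∨ prB t = 2 ∨ prB t = 3 := by
  unfold prB; split_ifs <;> simp

-- ===== VERDICT (by name: the statement is the Claim_ definition above) =====
theorem build_workflow_cards_spec : Claim_equal_build_workflow_cards := by
  intro workflows _ _
  unfold Spec_build_workflow_cards build_workflow_cards build_workflow_cards_alt
  have hcards : workflows.foldl (fun acc w => acc ++ [cardA w]) [] = workflows.map cardB := by
    rw [PySem.List.foldl_append_singleton_eq_map]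
    exact List.map_congr_left (fun w _ => cardA_eq_cardB w)
  have hkey : keyA = fun c => prB (wfGetD c "triage" none) := funext keyA_eq_prB
  simp only [hcards, hkey]
  exact sorted_eq_buckets _ (fun c => prB_range _) _
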